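-- pv_equiv track=rewrite | github.com/openculinary/hashedixsearch | hashedixsearch/_utils.py | _candidate_matches
-- ===== SOURCE A (Python) =====
-- from string import punctuation
--
-- def _is_separator(token):
--     if token is None:
--         return False
--     if token.isspace():
--         return True
--     if token.strip(punctuation) == str():
--         return True
--     return False
--
-- def _candidate_matches(ngram, terms):
--
--     # Never consider an ngram that begins with a separator as a match
--     if _is_separator(ngram[0]):
--         return
--
--     # Open an iterator over each candidate term's tokens
--     candidates = {term: iter(tokens) for term, tokens in terms.items()}
--
--     # Step through the input ngram
--     tokens = iter(ngram)
--     while token := next(tokens, None):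
--
--         # Skip past separator tokens
--         while _is_separator(token):
--             token = next(tokens, None)
--         if not token:
--             break
--
--         # Narrow the list of candidates to those that continue to match
--         candidates = {
--             term: remaining_tokens
--             for term, remaining_tokens in candidates.items()
--             if next(remaining_tokens, None) == token
--         }
--
--     # Return the candidate terms along with copies of their token lists
--     return {
--         term: list(remaining_tokens)
--         for term, remaining_tokens in terms.items()
--         if term in candidates
--     }
-- ===== SOURCE B (Python) =====
-- from string import punctuation
--
-- def _is_separator(token):
--     if token is None:
--         return False
--     if token.isspace():
--         return True
--     if token.strip(punctuation) == str():
--         return True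
--     return False
--
-- def _candidate_matches(ngram, terms):
--     # Never consider an ngram that begins with a separator as a match
--     if _is_separator(ngram[0]):
--         return None
--
--     # Extract the query: walk the ngram once, stopping at a falsy token seen
--     # at the head of a step, skipping runs of separator tokens otherwise.
--     query = []
--     i, n = 0, len(ngram)
--     while i < n and ngram[i]:
--         j = i
--         while j < n and _is_separator(ngram[j]):
--             j += 1
--         if j >= n:
--             break
--         query.append(ngram[j])
--         i = j + 1
--
--     # A term matches iff its tokens start with the query; copy its tokens.
--     k = len(query)
--     return {term: list(tokens) for term, tokens in terms.items()
--             if list(tokens)[:k] == query}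
-- ===== Notes on version B (the rewrite author's own statement) =====
-- stated objective: simpler
-- what changed: B extracts the query token list from the ngram in one pass and then keeps each term whose token list starts with that query, instead of A's lockstep pruning of a dict mapping every term to a live iterator over its tokens at each ngram step.
import Mathlib
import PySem

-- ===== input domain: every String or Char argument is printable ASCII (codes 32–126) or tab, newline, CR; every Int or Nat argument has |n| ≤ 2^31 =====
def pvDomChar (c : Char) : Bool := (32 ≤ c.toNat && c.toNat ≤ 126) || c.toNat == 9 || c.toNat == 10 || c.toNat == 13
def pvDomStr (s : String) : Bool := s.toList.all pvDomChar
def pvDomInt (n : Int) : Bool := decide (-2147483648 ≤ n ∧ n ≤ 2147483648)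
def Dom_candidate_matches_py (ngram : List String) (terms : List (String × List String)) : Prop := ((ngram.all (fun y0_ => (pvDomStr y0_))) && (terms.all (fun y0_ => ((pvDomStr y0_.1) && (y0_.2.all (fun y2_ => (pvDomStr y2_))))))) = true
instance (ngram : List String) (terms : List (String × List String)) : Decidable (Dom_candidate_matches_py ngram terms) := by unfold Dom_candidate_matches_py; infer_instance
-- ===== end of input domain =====

-- B replaces A's lockstep pruning of a dict of token iterators by extracting the query
-- prefix once and testing each term's tokens against it (objective: simpler).

-- ===== PORT A =====
-- string.punctuation
def pvPunct : String := "!\"#$%&'()*+,-./:;<=>?@[\\]^_`{|}~"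

-- _is_separator (token is always a str here; the `token is None` branch returns False and
-- both loops below pass Options through explicitly, so it is dropped)
def pyIsSeparator (token : String) : Bool :=
  if PySem.Str.strIsspace token then true
  else if PySem.Str.stripChars token pvPunct == "" then true
  else false

-- A's inner `while _is_separator(token): token = next(tokens, None)`:
-- first non-separator token and the remaining tokens, or none if the iterator is exhausted
def pvSkipSepA : List String → Option (String × List String)
  | [] => none
  | t :: r => if pyIsSeparator t then pvSkipSepA r else some (t, r)

-- A's dict comprehension narrowing candidates: advance each iterator, keep on match
-- (next(remaining_tokens, None) == token; tok is truthy so None never matches)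
def pvPrune (cands : List (String × List String)) (tok : String) : List (String × List String) :=
  cands.filterMap (fun c => match c.2 with
    | [] => none
    | x :: xs => if x == tok then some (c.1, xs) else none)

theorem pvSkipSepA_length : ∀ (l : List String) (tok : String) (r' : List String),
    pvSkipSepA l = some (tok, r') → r'.length < l.length := by
  intro l
  induction l with
  | nil => intro tok r' h; simp [pvSkipSepA] at h
  | cons t r ih =>
    intro tok r' h
    simp only [pvSkipSepA] at h
    split at h
    · exact Nat.lt_trans (ih _ _ h) (by simp)
    · simp at h; simp [h.2.symm]

-- A's outer `while token := next(tokens, None)` loop over the ngram, threading candidates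
def pvALoop : List String → List (String × List String) → List (String × List String)
  | [], cands => cands
  | t :: r, cands =>
    if t == "" then cands
    else match h : pvSkipSepA (t :: r) with
      | none => cands
      | some (tok, r') =>
        if tok == "" then cands
        else pvALoop r' (pvPrune cands tok)
termination_by l _ => l.length
decreasing_by exact pvSkipSepA_length _ _ _ h

def candidate_matches_py (ngram : List String) (terms : List (String × List String)) : Option (List (String × List String)) :=
  match ngram with
  | [] => none  -- Python raises IndexError on ngram[0]; excluded by Pre_
  | t0 :: _ =>
    if pyIsSeparator t0 then none
    else
      -- candidates = {term: iter(tokens) …}; the final dict keeps the terms whose key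
      -- is still in candidates, paired with list(remaining_tokens) = the full token list
      let final := pvALoop ngram terms
      some (terms.filter (fun p => (final.map Prod.fst).contains p.1))

-- ===== PORT B =====
-- Source B's inner `while j < n and _is_separator(ngram[j]): j += 1`
def pvDropSep : List String → List String
  | [] => []
  | t :: r => if pyIsSeparator t then pvDropSep r else t :: r

theorem pvDropSep_length_le : ∀ (l : List String), (pvDropSep l).length ≤ l.length := by
  intro l
  induction l with
  | nil => simp [pvDropSep]
  | cons t r ih => simp only [pvDropSep]; split <;> simp <;> omega

-- Source B's query-extraction loop: stop at a falsy token at the head of a step,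
-- otherwise skip the run of separators and append the token found
def pvQuery : List String → List String
  | [] => []
  | t :: r =>
    if t == "" then []
    else match h : pvDropSep (t :: r) with
      | [] => []
      | tok :: r' => tok :: pvQuery r'
termination_by l => l.length
decreasing_by
  have := pvDropSep_length_le (t :: r)
  rw [h] at this
  simp only [List.length_cons] at this ⊢
  omega

def candidate_matches_py_alt (ngram : List String) (terms : List (String × List String)) : Option (List (String × List String)) :=
  match ngram with
  | [] => none  -- ngram[0] raises IndexError in Source B too; excluded by Pre_
  | t0 :: _ =>
    if pyIsSeparator t0 then none
    else
      let q := pvQuery ngram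
      -- {term: list(tokens) for term, tokens in terms.items() if list(tokens)[:k] == query}
      some (terms.filter (fun p => List.take q.length p.2 == q))

-- ===== PRECONDITION & SPEC =====
-- Pre_ excludes the empty ngram, on which A raises IndexError, and term lists with
-- duplicate keys, which cannot occur because `terms` is a Python dict.
def Pre_candidate_matches_py (ngram : List String) (terms : List (String × List String)) : Prop :=
  ngram ≠ [] ∧ (terms.map Prod.fst).Nodup
instance (ngram : List String) (terms : List (String × List String)) : Decidable (Pre_candidate_matches_py ngram terms) := by unfold Pre_candidate_matches_py; infer_instance

def pvWitness_candidate_matches_py : List String × (List (String × List String)) :=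
  (["a", " ", "b"], [("t", ["a", "b", "c"]), ("u", ["x"])])

def Spec_candidate_matches_py (ngram : List String) (terms : List (String × List String)) (out : Option (List (String × List String))) : Prop := out = candidate_matches_py_alt ngram terms
instance (ngram : List String) (terms : List (String × List String)) (out : Option (List (String × List String))) : Decidable (Spec_candidate_matches_py ngram terms out) := by unfold Spec_candidate_matches_py; infer_instance

-- ===== CLAIM (what is proved, stated in full; the proofs are below) =====
def Claim_equal_candidate_matches_py : Prop := ∀ (ngram : List String) (terms : List (String × List String)), Dom_candidate_matches_py ngram terms → Pre_candidate_matches_py ngram terms → Spec_candidate_matches_py ngram terms (candidate_matches_py ngram terms)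

-- ===== LEMMAS AND PROOFS =====

-- what an element of the candidate list looks like after the whole pruning loop
def pvSurvives (q : List String) (c : String × List String) : Option (String × List String) :=
  if List.take q.length c.2 = q then some (c.1, c.2.drop q.length) else none

theorem pvSkipSepA_eq_dropSep (l : List String) :
    pvSkipSepA l = match pvDropSep l with | [] => none | x :: xs => some (x, xs) := by
  induction l with
  | nil => simp [pvSkipSepA, pvDropSep]
  | cons t r ih => simp only [pvSkipSepA, pvDropSep]; split <;> simp [ih]

theorem pvSkipSepA_not_sep (l : List String) (tok : String) (r' : List String)
    (h : pvSkipSepA l = some (tok, r')) : pyIsSeparator tok = false := by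
  induction l with
  | nil => simp [pvSkipSepA] at h
  | cons t r ih =>
    simp only [pvSkipSepA] at h
    split at h
    · exact ih h
    · rename_i hs; simp at h; rw [← h.1]; simpa using hs

theorem pvEmpty_is_sep : pyIsSeparator "" = true := by decide

theorem pvQuery_eq (t : String) (r : List String) :
    pvQuery (t :: r) = if t == "" then []
      else match pvDropSep (t :: r) with
        | [] => []
        | tok :: r' => tok :: pvQuery r' := by
  rw [pvQuery]
  rcases h : pvDropSep (t :: r) with _ | ⟨x, xs⟩ <;> simp [h]

theorem pvALoop_eq_filterMap : ∀ (rest : List String) (cands : List (String × List String)),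
    pvALoop rest cands = cands.filterMap (pvSurvives (pvQuery rest)) := by
  intro rest cands
  induction rest, cands using pvALoop.induct with
  | case1 cands =>
    simp only [pvALoop, pvQuery, pvSurvives, List.take_nil, List.length_nil, List.take_zero,
      if_pos rfl, List.drop_zero]
    simp
  | case2 t r cands ht =>
    rw [pvALoop]
    simp only [ht, if_true]
    rw [pvQuery_eq]
    simp only [ht, if_true]
    simp [pvSurvives]
  | case3 t r cands ht h =>
    rw [pvALoop]
    simp only [ht, if_false]
    rw [h]
    rw [pvQuery_eq]
    simp only [ht, if_false]
    have hd := pvSkipSepA_eq_dropSep (t :: r)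
    rw [h] at hd
    rcases hdrop : pvDropSep (t :: r) with _ | ⟨x, xs⟩
    · simp [pvSurvives]
    · rw [hdrop] at hd; simp at hd
  | case4 t r cands ht tok r' h htok =>
    exact absurd (pvSkipSepA_not_sep _ _ _ h) (by simp at htok; simp [htok, pvEmpty_is_sep])
  | case5 t r cands ht tok r' h htok ih =>
    rw [pvALoop]
    simp only [ht, if_false]
    rw [h]
    simp only [htok, if_false]
    rw [ih]
    rw [pvQuery_eq]
    simp only [ht, if_false]
    have hd := pvSkipSepA_eq_dropSep (t :: r)
    rw [h] at hd
    rcases hdrop : pvDropSep (t :: r) with _ | ⟨x, xs⟩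
    · rw [hdrop] at hd; simp at hd
    · rw [hdrop] at hd
      simp only [Option.some.injEq, Prod.mk.injEq] at hd
      obtain ⟨hx, hxs⟩ := hd
      subst hx; subst hxs
      rw [pvPrune, List.filterMap_filterMap]
      apply List.filterMap_congr
      intro c _
      rcases c with ⟨term, toks⟩
      rcases toks with _ | ⟨y, ys⟩
      · simp [pvSurvives]
      · simp only []
        by_cases hy : y = tok
        · subst hy
          simp only [beq_self_eq_true, if_true, Option.bind_some]
          simp [pvSurvives, List.take_succ_cons, List.drop_succ_cons]
        · simp [hy, pvSurvives, List.take_succ_cons, Ne.symm hy]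

-- keys are preserved by pvSurvives, so the surviving keys are the keys of the filter
theorem pvKeys_filterMap (l : List (String × List String)) (q : List String) :
    (l.filterMap (pvSurvives q)).map Prod.fst
      = (l.filter (fun c => List.take q.length c.2 == q)).map Prod.fst := by
  induction l with
  | nil => simp
  | cons a l ih =>
    rw [List.filterMap_cons, List.filter_cons]
    by_cases hcond : List.take q.length a.2 = q
    · rw [show pvSurvives q a = some (a.1, List.drop q.length a.2) from by
        simp [pvSurvives, hcond]]
      simp [hcond, ih]
    · rw [show pvSurvives q a = none from by simp [pvSurvives, hcond]]
      simp [hcond, ih]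

-- under distinct keys, key-membership in the filtered keys is the predicate itself
theorem pvContains_filter_keys (l : List (String × List String))
    (pred : String × List String → Bool) (p : String × List String)
    (hp : p ∈ l) (hnd : (l.map Prod.fst).Nodup) :
    ((l.filter pred).map Prod.fst).contains p.1 = pred p := by
  induction l with
  | nil => simp at hp
  | cons a l ih =>
    simp only [List.map_cons, List.nodup_cons] at hnd
    obtain ⟨ha, hnd'⟩ := hnd
    have hsub : ∀ k, k ∈ (l.filter pred).map Prod.fst → k ∈ l.map Prod.fst := by
      intro k hk
      rcases List.mem_map.mp hk with ⟨q, hq, hq1⟩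
      exact hq1 ▸ List.mem_map_of_mem (List.mem_of_mem_filter hq)
    rcases List.mem_cons.mp hp with hpa | hpl
    · subst hpa
      by_cases hpr : pred p
      · simp [List.filter_cons, hpr]
      · simp only [List.filter_cons, hpr, Bool.false_eq_true, if_false]
        simp only [List.contains_eq_mem, decide_eq_false_iff_not]
        intro hmem
        exact ha (hsub _ hmem)
    · have hne : a.1 ≠ p.1 := fun he => ha (he ▸ List.mem_map_of_mem hpl)
      simp only [List.filter_cons]
      split
      · have hb : (p.1 == a.1) = false := beq_eq_false_iff_ne.mpr (Ne.symm hne)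
        simp only [List.map_cons, List.contains_cons, hb, Bool.false_or]
        simpa [List.contains_eq_mem] using ih hpl hnd' 
      · exact ih hpl hnd'

-- ===== VERDICT (by name: the statement is the Claim_ definition above) =====
theorem candidate_matches_py_spec : Claim_equal_candidate_matches_py := by
  intro ngram terms _ hpre
  obtain ⟨hne, hnd⟩ := hpre
  unfold Spec_candidate_matches_py candidate_matches_py candidate_matches_py_alt
  rcases ngram with _ | ⟨t0, rest⟩
  · exact absurd rfl hne
  · by_cases hsep : pyIsSeparator t0
    · simp [hsep]
    · simp only [hsep, if_false, Option.some.injEq]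
      rw [pvALoop_eq_filterMap, pvKeys_filterMap]
      simp only [Bool.false_eq_true, if_false, Option.some.injEq]
      apply List.filter_congr
      intro p hp
      exact pvContains_filter_keys terms _ p hp hnd
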